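-- pv_equiv track=rewrite | github.com/ju-c-lopes/Univesp_Algoritmos_I | Semana 6/exercicio5.5.py | acronimo
-- ===== SOURCE A (Python) =====
-- def acronimo(texto):
--     """
--     Pegará a primeira letra de cada palavra da string informada e retornará
--     suas iniciais em letra maiúscula.
--     """
--     acr = []
--     texto = texto.split()
--     for i in texto:
--         acr.append(i[0])
--     new_word = ''.join(acr)
--     new_word = new_word.upper()
--     return new_word
-- ===== SOURCE B (Python) =====
-- def acronimo(texto):
--     """
--     Pegará a primeira letra de cada palavra da string informada e retornará
--     suas iniciais em letra maiúscula.
--     """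
--     res = []
--     prev_was_space = True
--     for ch in texto:
--         if not ch.isspace() and prev_was_space:
--             res.append(ch.upper())
--         prev_was_space = ch.isspace()
--     return ''.join(res)
-- ===== Notes on version B (the rewrite author's own statement) =====
-- stated objective: alternative
-- what changed: Single character scan with a word-boundary flag collects each word's initial directly, instead of building a full word list with split() and then indexing, joining and uppercasing in further passes; it trades split()'s C-level speed for one pass and O(1) extra state per step.
import Mathlib
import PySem

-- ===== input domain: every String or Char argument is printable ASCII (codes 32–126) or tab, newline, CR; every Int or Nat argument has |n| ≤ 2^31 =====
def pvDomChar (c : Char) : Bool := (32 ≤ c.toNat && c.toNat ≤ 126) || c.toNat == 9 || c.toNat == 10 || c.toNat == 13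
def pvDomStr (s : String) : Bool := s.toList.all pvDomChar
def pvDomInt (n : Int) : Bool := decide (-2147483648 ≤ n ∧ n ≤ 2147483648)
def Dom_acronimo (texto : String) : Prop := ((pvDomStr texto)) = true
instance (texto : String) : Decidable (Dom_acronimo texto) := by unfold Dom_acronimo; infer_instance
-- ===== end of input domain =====

-- B replaces split()+index+join()+upper() by a single character scan with a word-boundary flag (alternative decomposition, not claimed faster).

-- ===== PORT A =====
-- literal port: split(), take i[0] of each word (split words are nonempty, so the
-- Python indexing never raises; the ' ' default of getD is never used), join, upper
def acronimo (texto : String) : String :=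
  let words := PySem.Chars.split₀ texto.toList
  let acr := words.foldl (fun a w => a ++ [(PySem.List.pyGet? w 0).getD ' ']) ([] : List Char)
  let new_word := PySem.Chars.join [] (acr.map (fun c => [c]))   -- ''.join(acr)
  String.ofList (PySem.Chars.upper new_word)

-- ===== PORT B =====
-- one pass: collect ch.upper() whenever a non-space char follows a space (or the start)
def acronimo_alt (texto : String) : String :=
  let st := texto.toList.foldl
    (fun (st : List Char × Bool) ch =>
      let res := if !PySem.Chars.isspace ch && st.2 then st.1 ++ [PySem.Chars.upperChar ch] else st.1
      (res, PySem.Chars.isspace ch))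
    (([] : List Char), true)
  String.ofList (PySem.Chars.join [] (st.1.map (fun c => [c])))   -- ''.join(res)

-- ===== PRECONDITION & SPEC =====
def Spec_acronimo (texto : String) (out : String) : Prop := out = acronimo_alt texto
instance (texto : String) (out : String) : Decidable (Spec_acronimo texto out) := by unfold Spec_acronimo; infer_instance

-- ===== CLAIM (what is proved, stated in full; the proofs are below) =====
def Claim_equal_acronimo : Prop := ∀ (texto : String), Dom_acronimo texto → Spec_acronimo texto (acronimo texto)

-- ===== LEMMAS AND PROOFS =====

-- initials-with-uppercase of the words starting in cs, given whether the previous char was a space (or the start)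
def scanB : List Char → Bool → List Char
  | [], _ => []
  | c :: t, prev =>
      (if !PySem.Chars.isspace c && prev then [PySem.Chars.upperChar c] else []) ++
        scanB t (PySem.Chars.isspace c)

-- B's foldl accumulates exactly scanB
theorem foldB_eq (cs : List Char) (res : List Char) (prev : Bool) :
    (cs.foldl
      (fun (st : List Char × Bool) ch =>
        let r := if !PySem.Chars.isspace ch && st.2 then st.1 ++ [PySem.Chars.upperChar ch] else st.1
        (r, PySem.Chars.isspace ch)) (res, prev)).1 = res ++ scanB cs prev := by
  induction cs generalizing res prev with
  | nil => simp [scanB]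
  | cons c t ih =>
      rw [List.foldl_cons]
      show (t.foldl _ (if !PySem.Chars.isspace c && prev then res ++ [PySem.Chars.upperChar c] else res,
              PySem.Chars.isspace c)).1 = _
      by_cases h : (!PySem.Chars.isspace c && prev) = true
      · rw [if_pos h, ih]; simp [scanB, h]
      · rw [if_neg h, ih]; simp [scanB, h]

def hFn (w : List Char) : Char := PySem.Chars.upperChar ((PySem.List.pyGet? w 0).getD ' ')

theorem goScan (cs cur : List Char) (accW : List (List Char)) :
    (PySem.Chars.split₀.go cs cur accW).map hFn
      = accW.reverse.map hFn ++
        (match cur.getLast? with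
         | none => scanB cs true
         | some x => PySem.Chars.upperChar x :: scanB cs false) := by
  induction cs generalizing cur accW with
  | nil =>
      cases hc : cur.getLast? with
      | none =>
          have : cur = [] := List.getLast?_eq_none_iff.mp hc
          subst this
          simp [PySem.Chars.split₀.go, scanB]
      | some x =>
          have hne : cur ≠ [] := by intro h; subst h; simp at hc
          have hd : cur.reverse.head? = some x := by
            rw [List.head?_reverse]; exact hc
          have hgo : PySem.Chars.split₀.go [] cur accW = (cur.reverse :: accW).reverse := by
            simp [PySem.Chars.split₀.go, hne]
          rw [hgo]
          obtain ⟨a, t, hrev⟩ : ∃ a t, cur.reverse = a :: t := by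
            cases hr : cur.reverse with
            | nil => exact absurd (by simpa using hr) hne
            | cons a t => exact ⟨a, t, rfl⟩
          have hx : a = x := by rw [hrev] at hd; simpa using hd
          simp [hrev, hFn, hx, scanB]
  | cons c t ih =>
      by_cases hs : PySem.Chars.isspace c = true
      · cases hc : cur.getLast? with
        | none =>
            have : cur = [] := List.getLast?_eq_none_iff.mp hc
            subst this
            have hgo : PySem.Chars.split₀.go (c :: t) [] accW = PySem.Chars.split₀.go t [] accW := by
              simp [PySem.Chars.split₀.go, hs]
            rw [hgo, ih [] accW]
            simp [scanB, hs]
        | some x =>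
            have hne : cur ≠ [] := by intro h; subst h; simp at hc
            have hd : cur.reverse.head? = some x := by rw [List.head?_reverse]; exact hc
            have hgo : PySem.Chars.split₀.go (c :: t) cur accW
                = PySem.Chars.split₀.go t [] (cur.reverse :: accW) := by
              simp [PySem.Chars.split₀.go, hs, hne]
            rw [hgo, ih [] (cur.reverse :: accW)]
            obtain ⟨a, t', hrev⟩ : ∃ a t', cur.reverse = a :: t' := by
              cases hr : cur.reverse with
              | nil => exact absurd (by simpa using hr) hne
              | cons a t' => exact ⟨a, t', rfl⟩
            have hx : a = x := by rw [hrev] at hd; simpa using hd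
            simp [scanB, hs, hrev, hFn, hx]
      · have hgo : PySem.Chars.split₀.go (c :: t) cur accW
            = PySem.Chars.split₀.go t (c :: cur) accW := by
          simp [PySem.Chars.split₀.go, hs]
        rw [hgo, ih (c :: cur) accW]
        cases hc : cur.getLast? with
        | none =>
            have : cur = [] := List.getLast?_eq_none_iff.mp hc
            subst this
            simp [scanB, hs]
        | some x =>
            have h2 : (c :: cur).getLast? = some x := by
              rw [List.getLast?_cons]; simp [hc]
            simp [h2, scanB, hs]

-- ''.join over one-character pieces is the identity
theorem join_singletons : (cs : List Char) →
    PySem.Chars.join [] (cs.map (fun c => [c])) = cs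
  | [] => by simp [PySem.Chars.join, List.intercalate]
  | [a] => by simp [PySem.Chars.join, List.intercalate]
  | a :: b :: t => by
      have ih := join_singletons (b :: t)
      simp only [PySem.Chars.join, List.intercalate, List.map_cons] at ih ⊢
      simp only [List.intersperse] at ih ⊢
      simpa using ih

theorem foldA_eq (ws : List (List Char)) (init : List Char) :
    ws.foldl (fun a w => a ++ [(PySem.List.pyGet? w 0).getD ' ']) init
      = init ++ ws.map (fun w => (PySem.List.pyGet? w 0).getD ' ') := by
  induction ws generalizing init with
  | nil => simp
  | cons w t ih => simp [ih, List.append_assoc]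

-- ===== VERDICT (by name: the statement is the Claim_ definition above) =====
theorem acronimo_spec : Claim_equal_acronimo := by
  intro texto _
  show acronimo texto = acronimo_alt texto
  unfold acronimo acronimo_alt
  simp only [foldA_eq, foldB_eq, List.nil_append, join_singletons]
  have hA : PySem.Chars.upper
      ((PySem.Chars.split₀ texto.toList).map (fun w => (PySem.List.pyGet? w 0).getD ' '))
      = (PySem.Chars.split₀ texto.toList).map hFn := by
    simp [PySem.Chars.upper, List.map_map, hFn, Function.comp]
  rw [hA]
  exact congrArg String.ofList (by simpa [PySem.Chars.split₀] using goScan texto.toList [] [])
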